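-- pv_equiv track=rewrite | github.com/JeremyChim/dt | script/tab_script.py | tab_down
-- ===== SOURCE A (Python) =====
-- def tab_down(old_text):
--     old_list = old_text.split('\n')
--     new_list = []
--     for row in old_list:
--         if len(row) != 0 and row[0] == '\t':
--             new_list.append(row[1:])
--         else:
--             new_list.append(row)
--     new_text = '\n'.join(new_list)
--     return new_text
-- ===== SOURCE B (Python) =====
-- def tab_down(old_text):
--     # Single pass: drop one tab at the start of the text and after each newline.
--     out = []
--     at_start = True
--     for c in old_text:
--         if at_start and c == '\t':
--             at_start = False
--             continue
--         out.append(c)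
--         at_start = (c == '\n')
--     return ''.join(out)
-- ===== Notes on version B (the rewrite author's own statement) =====
-- stated objective: alternative
-- what changed: Replaces the split-on-newline / per-line list building / join pipeline with a single character scan driven by an at-line-start flag that drops one leading tab per line, building no intermediate line list.
import Mathlib
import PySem

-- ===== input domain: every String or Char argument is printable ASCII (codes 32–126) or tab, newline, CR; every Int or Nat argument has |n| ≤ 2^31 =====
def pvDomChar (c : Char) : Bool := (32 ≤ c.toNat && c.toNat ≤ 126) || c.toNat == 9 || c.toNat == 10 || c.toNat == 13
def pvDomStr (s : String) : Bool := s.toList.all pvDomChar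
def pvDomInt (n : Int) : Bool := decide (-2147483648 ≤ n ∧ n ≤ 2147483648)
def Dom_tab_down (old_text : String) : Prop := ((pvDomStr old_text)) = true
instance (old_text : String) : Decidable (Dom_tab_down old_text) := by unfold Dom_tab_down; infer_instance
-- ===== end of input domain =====

-- B replaces A's split/loop/join with a single character scan using an at-line-start flag (no line list built).

-- ===== PORT A =====
-- A: split on '\n', per line drop a single leading tab, join back with '\n'.
def tab_down (old_text : String) : String :=
  let old_list := PySem.Chars.splitOn old_text.toList "\n".toList
  let new_list := old_list.foldl (fun acc row =>
    if row.length ≠ 0 ∧ PySem.List.pyGet? row 0 = some '\t' then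
      acc ++ [PySem.List.slice row (some 1) none]
    else
      acc ++ [row]) []
  String.ofList (PySem.Chars.join "\n".toList new_list)

-- ===== PORT B =====
-- B: one pass over the characters; `atStart` is true at the text start and right after each '\n';
-- a tab seen with atStart is skipped (the `continue` branch), every other char is emitted.
def tabScan : List Char → Bool → List Char
  | [], _ => []
  | c :: cs, atStart =>
    if atStart && c == '\t' then tabScan cs false
    else c :: tabScan cs (c == '\n')

def tab_down_alt (old_text : String) : String :=
  String.ofList (tabScan old_text.toList true)

-- ===== PRECONDITION & SPEC =====
def Spec_tab_down (old_text : String) (out : String) : Prop := out = tab_down_alt old_text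
instance (old_text : String) (out : String) : Decidable (Spec_tab_down old_text out) := by unfold Spec_tab_down; infer_instance

-- ===== CLAIM (what is proved, stated in full; the proofs are below) =====
def Claim_equal_tab_down : Prop := ∀ (old_text : String), Dom_tab_down old_text → Spec_tab_down old_text (tab_down old_text)

-- ===== LEMMAS AND PROOFS =====

-- structural description of splitting on a single '\n'
def splitNL : List Char → List (List Char)
  | [] => [[]]
  | c :: cs =>
    if c = '\n' then [] :: splitNL cs
    else match splitNL cs with
      | [] => [[c]]
      | l :: ls => (c :: l) :: ls

def prependHead (p : List Char) : List (List Char) → List (List Char)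
  | [] => [p]
  | l :: ls => (p ++ l) :: ls

lemma splitNL_ne_nil (cs : List Char) : splitNL cs ≠ [] := by
  cases cs with
  | nil => simp [splitNL]
  | cons c cs =>
    simp only [splitNL]
    split
    · simp
    · cases h : splitNL cs <;> simp

lemma go_spec (l : List Char) : ∀ (fuel : Nat) (cur : List Char) (acc : List (List Char)),
    l.length ≤ fuel →
    PySem.Chars.splitOn.go ['\n'] fuel l cur acc
      = acc.reverse ++ prependHead cur.reverse (splitNL l) := by
  induction l with
  | nil =>
    intro fuel cur acc _
    cases fuel <;> simp [PySem.Chars.splitOn.go, splitNL, prependHead]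
  | cons c rest ih =>
    intro fuel cur acc hf
    cases fuel with
    | zero => simp at hf
    | succ n =>
      simp only [List.length_cons, Nat.succ_le_succ_iff] at hf
      by_cases hc : c = '\n'
      · subst hc
        have hpre : List.isPrefixOf ['\n'] ('\n' :: rest) = true := by
          simp [List.isPrefixOf]
        simp only [PySem.Chars.splitOn.go, hpre, if_pos, List.length_singleton,
          List.drop_one, List.tail_cons]
        rw [ih n [] _ hf]
        simp [splitNL]
        cases h : splitNL rest with
        | nil => exact absurd h (splitNL_ne_nil rest)
        | cons l ls => simp [prependHead]
      · have hpre : List.isPrefixOf ['\n'] (c :: rest) = false := by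
          simp [List.isPrefixOf]
          exact fun h => hc h.symm
        simp only [PySem.Chars.splitOn.go, hpre, Bool.false_eq_true, if_false]
        rw [ih n (c :: cur) acc hf]
        simp only [splitNL, hc, if_false, List.reverse_cons]
        cases h : splitNL rest with
        | nil => exact absurd h (splitNL_ne_nil rest)
        | cons l ls => simp [prependHead]

lemma splitOn_newline (cs : List Char) :
    PySem.Chars.splitOn cs "\n".toList = splitNL cs := by
  have h : "\n".toList = ['\n'] := rfl
  rw [h]
  show PySem.Chars.splitOn.go ['\n'] (cs.length + 1) cs [] [] = splitNL cs
  rw [go_spec cs (cs.length + 1) [] [] (by omega)]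
  cases h2 : splitNL cs with
  | nil => exact absurd h2 (splitNL_ne_nil cs)
  | cons l ls => simp [prependHead]

-- the per-row transformation A's loop applies
def dropTab (row : List Char) : List Char :=
  if row.length ≠ 0 ∧ PySem.List.pyGet? row 0 = some '\t' then
    PySem.List.slice row (some 1) none
  else row

lemma dropTab_nil : dropTab [] = [] := by simp [dropTab]

lemma dropTab_cons (c : Char) (l : List Char) :
    dropTab (c :: l) = if c = '\t' then l else c :: l := by
  simp only [dropTab, List.length_cons, ne_eq, Nat.succ_ne_zero, not_false_iff, true_and]
  by_cases hc : c = '\t'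
  · subst hc
    simp [PySem.List.pyGet?, PySem.List.pyIdx?, PySem.List.slice_from_one]
  · simp [PySem.List.pyGet?, PySem.List.pyIdx?, hc]

-- A's foldl-append loop is a map
lemma foldl_dropTab (rows : List (List Char)) :
    rows.foldl (fun acc row =>
      if row.length ≠ 0 ∧ PySem.List.pyGet? row 0 = some '\t' then
        acc ++ [PySem.List.slice row (some 1) none]
      else acc ++ [row]) [] = rows.map dropTab := by
  have hf : (fun (acc : List (List Char)) row =>
      if row.length ≠ 0 ∧ PySem.List.pyGet? row 0 = some '\t' then
        acc ++ [PySem.List.slice row (some 1) none]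
      else acc ++ [row]) = fun acc row => acc ++ [dropTab row] := by
    funext acc row
    simp only [dropTab]
    split <;> rfl
  rw [hf]
  have := PySem.List.foldl_append_singleton_eq_map (l := rows) (f := dropTab) (acc := [])
  simpa using this

-- the scan computes exactly join-of-mapped-split, in both flag states
lemma tabScan_spec (cs : List Char) :
    (tabScan cs true = PySem.Chars.join "\n".toList ((splitNL cs).map dropTab)) ∧
    (∀ l ls, splitNL cs = l :: ls →
      tabScan cs false = PySem.Chars.join "\n".toList (l :: ls.map dropTab)) := by
  induction cs with
  | nil =>
    constructor
    · simp [tabScan, splitNL, dropTab_nil, PySem.Chars.join_singleton]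
    · intro l ls h
      simp only [splitNL] at h
      cases h
      simp [tabScan, PySem.Chars.join_singleton]
  | cons c cs ih =>
    obtain ⟨ihT, ihF⟩ := ih
    obtain ⟨l0, ls0, h0⟩ : ∃ l ls, splitNL cs = l :: ls := by
      cases h : splitNL cs with
      | nil => exact absurd h (splitNL_ne_nil cs)
      | cons l ls => exact ⟨l, ls, rfl⟩
    by_cases hn : c = '\n'
    · subst hn
      have hsp : splitNL ('\n' :: cs) = [] :: splitNL cs := by simp [splitNL]
      constructor
      · simp only [tabScan, Bool.true_and, hsp, List.map_cons, dropTab_nil]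
        have : ('\n' == '\t') = false := by decide
        rw [this]
        simp only [Bool.false_eq_true, if_false, beq_self_eq_true]
        rw [ihT]
        rw [h0, List.map_cons, PySem.Chars.join_cons_cons]
        rfl
      · intro l ls h
        rw [hsp] at h
        cases h
        simp only [tabScan, Bool.false_and, Bool.false_eq_true, if_false, beq_self_eq_true]
        rw [ihT, h0, List.map_cons, PySem.Chars.join_cons_cons]
        rfl
    · constructor
      · have hsp : splitNL (c :: cs) = (c :: l0) :: ls0 := by
          simp [splitNL, hn, h0]
        by_cases ht : c = '\t'
        · subst ht
          simp only [tabScan, Bool.true_and, beq_self_eq_true, if_true]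
          rw [ihF l0 ls0 h0, hsp, List.map_cons, dropTab_cons]
          simp
        · have hbt : (c == '\t') = false := by simp [ht]
          have hbn : (c == '\n') = false := by simp [hn]
          simp only [tabScan, Bool.true_and, hbt, Bool.false_eq_true, if_false, hbn]
          rw [ihF l0 ls0 h0, hsp, List.map_cons, dropTab_cons]
          simp only [ht, if_false]
          cases ls0 with
          | nil => simp [PySem.Chars.join_singleton]
          | cons a as => simp [PySem.Chars.join_cons_cons]
      · intro l ls h
        simp only [splitNL, hn, if_false, h0] at h
        cases h
        have hbn : (c == '\n') = false := by simp [hn]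
        simp only [tabScan, Bool.false_and, Bool.false_eq_true, if_false, hbn]
        rw [ihF l0 ls0 h0]
        cases ls0 with
        | nil => simp [PySem.Chars.join_singleton]
        | cons a as => simp [PySem.Chars.join_cons_cons]

-- ===== VERDICT (by name: the statement is the Claim_ definition above) =====
theorem tab_down_spec : Claim_equal_tab_down := by
  intro old_text _
  show tab_down old_text = tab_down_alt old_text
  unfold tab_down tab_down_alt
  simp only []
  rw [splitOn_newline, foldl_dropTab, (tabScan_spec old_text.toList).1]
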